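-- pv_equiv track=rewrite | github.com/TincyThomas/301-Days-of-Problem-Solving | Doubleton Number.py | doubleton
-- ===== SOURCE A (Python) =====
-- def doubleton(n):
-- 	start = n
-- 	end=n+1
-- 	while(True):
-- 		for i in range(start,end):
-- 			a = str(i)
-- 			b = list(a)
-- 			c= set(b)
-- 			if len(c) == 2:
-- 				return i
-- 			else:
-- 				end = end+1
-- ===== SOURCE B (Python) =====
-- def doubleton(n):
--     i = n
--     while len(set(str(i))) != 2:
--         i += 1
--     return i
-- ===== Notes on version B (the rewrite author's own statement) =====
-- stated objective: simpler
-- what changed: A repeatedly rescans from n over a window that doubles after each failed pass; B checks each candidate exactly once in a single incremental while-loop.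
import Mathlib
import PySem

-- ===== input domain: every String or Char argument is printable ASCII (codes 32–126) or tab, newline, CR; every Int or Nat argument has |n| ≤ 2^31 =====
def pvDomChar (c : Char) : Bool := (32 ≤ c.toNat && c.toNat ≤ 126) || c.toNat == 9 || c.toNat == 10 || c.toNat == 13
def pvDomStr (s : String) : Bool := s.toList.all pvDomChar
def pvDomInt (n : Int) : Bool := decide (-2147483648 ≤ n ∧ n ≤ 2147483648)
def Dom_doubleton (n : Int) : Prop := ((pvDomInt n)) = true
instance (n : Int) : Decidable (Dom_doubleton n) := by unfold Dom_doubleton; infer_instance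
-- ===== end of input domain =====

-- B replaces A's repeated rescans from n over a growing range by one incremental scan; objective: simpler.

-- ===== PORT A =====
-- inner 'for i in range(start,end)': returns the found i, or (none, final end) after
-- incrementing end once per non-matching i (faithful: the range list is fixed at loop entry).
def pvForA : List Int → Int → Option Int × Int
  | [], e => (none, e)
  | i :: rest, e =>
      let a := PySem.Int.toStr i
      let b := a.toList
      let c := PySem.Set.ofList b
      if c.length == 2 then (some i, e) else pvForA rest (e + 1)

-- outer 'while(True)': fuel guard only (the Python loops until the inner for returns);
-- fuel 64 makes the search cover [n, n + 2^63).
def pvWhileA : Nat → Int → Int → Int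
  | 0, _, _ => 0
  | f + 1, s, e =>
      match pvForA (PySem.List.pyRange s e 1) e with
      | (some i, _) => i
      | (none, e') => pvWhileA f s e'

def doubleton (n : Int) : Int := pvWhileA 64 n (n + 1)

-- ===== PORT B =====
-- 'while len(set(str(i))) != 2: i += 1; return i' with a fuel guard (2^63, A's search space).
def pvScanB : Nat → Int → Int
  | 0, _ => 0
  | f + 1, i =>
      if (PySem.Set.ofList (PySem.Int.toStr i).toList).length == 2 then i
      else pvScanB f (i + 1)

def doubleton_alt (n : Int) : Int := pvScanB 9223372036854775808 n

-- ===== PRECONDITION & SPEC =====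
def Spec_doubleton (n : Int) (out : Int) : Prop := out = doubleton_alt n
instance (n : Int) (out : Int) : Decidable (Spec_doubleton n out) := by unfold Spec_doubleton; infer_instance

-- ===== CLAIM (what is proved, stated in full; the proofs are below) =====
def Claim_equal_doubleton : Prop := ∀ (n : Int), Dom_doubleton n → Spec_doubleton n (doubleton n)

-- ===== LEMMAS AND PROOFS =====

-- if A's inner for-loop finds nothing, 'end' grew by exactly the window length
theorem pv_forA_none_snd : ∀ (l : List Int) (acc : Int),
    (pvForA l acc).1 = none → (pvForA l acc).2 = acc + l.length := by
  intro l
  induction l with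
  | nil => intro acc _; simp [pvForA]
  | cons i rest ih =>
      intro acc h
      simp only [pvForA] at h ⊢
      by_cases hp : (PySem.Set.ofList (PySem.Int.toStr i).toList).length == 2
      · simp only [hp, ite_true] at h
        exact absurd h (by simp)
      · simp only [hp, Bool.false_eq_true, ite_false] at h ⊢
        rw [ih (acc + 1) h]
        simp only [List.length_cons]
        push_cast
        ring

-- B's scan of k+m numbers from s, split at A's inner for-loop over [s, s+k):
-- if the for finds i, the scan returns the same i; otherwise the scan continues at s+k.
theorem pv_forA_scan (k : Nat) : ∀ (m : Nat) (s acc : Int),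
    pvScanB (k + m) s =
      (match pvForA (PySem.List.pyRange s (s + (k : Int)) 1) acc with
        | (some i, _) => i
        | (none, _) => pvScanB m (s + (k : Int))) := by
  induction k with
  | zero =>
      intro m s acc
      simp [PySem.List.pyRange_one_eq_nil (le_refl s), pvForA]
  | succ k ih =>
      intro m s acc
      have hlt : s < s + ((k : Int) + 1) := by omega
      rw [show ((k + 1 : Nat) : Int) = (k : Int) + 1 by push_cast; ring]
      rw [PySem.List.pyRange_one_cons hlt]
      rw [show k + 1 + m = (k + m) + 1 by omega]
      simp only [pvForA, pvScanB]
      by_cases hp : (PySem.Set.ofList (PySem.Int.toStr s).toList).length == 2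
      · simp only [hp, ite_true]
      · simp only [hp, Bool.false_eq_true, ite_false]
        have h := ih m (s + 1) (acc + 1)
        rw [show (s + 1) + (k : Int) = s + ((k : Int) + 1) by ring] at h
        exact h

-- A's while-loop with fuel f+1 over the window [s, e) is B's scan of (e-s)·2^f numbers from s.
theorem pv_whileA_eq (f : Nat) : ∀ (s e : Int), s ≤ e →
    pvWhileA (f + 1) s e = pvScanB ((e - s).toNat * 2 ^ f) s := by
  induction f with
  | zero =>
      intro s e hse
      have hk : s + (((e - s).toNat : Nat) : Int) = e := by omega
      show (match pvForA (PySem.List.pyRange s e 1) e with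
            | (some i, _) => i
            | (none, e') => pvWhileA 0 s e') = _
      rw [show (e - s).toNat * 2 ^ 0 = (e - s).toNat + 0 by omega,
          pv_forA_scan ((e - s).toNat) 0 s e, hk]
      cases hfa : pvForA (PySem.List.pyRange s e 1) e with
      | mk o e' => cases o <;> simp [pvWhileA, pvScanB]
  | succ f ih =>
      intro s e hse
      have hk : s + (((e - s).toNat : Nat) : Int) = e := by omega
      have hle : (e - s).toNat ≤ (e - s).toNat * 2 ^ (f + 1) :=
        Nat.le_mul_of_pos_right _ (by positivity)
      show (match pvForA (PySem.List.pyRange s e 1) e with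
            | (some i, _) => i
            | (none, e') => pvWhileA (f + 1) s e') = _
      rw [show (e - s).toNat * 2 ^ (f + 1)
            = (e - s).toNat + ((e - s).toNat * 2 ^ (f + 1) - (e - s).toNat) by omega,
          pv_forA_scan ((e - s).toNat) _ s e, hk]
      cases hfa : pvForA (PySem.List.pyRange s e 1) e with
      | mk o e' =>
        cases o with
        | some i => rfl
        | none =>
            have hnone : (pvForA (PySem.List.pyRange s e 1) e).2
                = e + (PySem.List.pyRange s e 1).length :=
              pv_forA_none_snd _ _ (by rw [hfa])
            rw [hfa, PySem.List.length_pyRange_one] at hnone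
            simp only at hnone
            have hse' : s ≤ e' := by omega
            show pvWhileA (f + 1) s e'
              = pvScanB ((e - s).toNat * 2 ^ (f + 1) - (e - s).toNat) e
            rw [ih s e' hse']
            have harg : (e' - s).toNat * 2 ^ f
                = (e - s).toNat + ((e - s).toNat * 2 ^ (f + 1) - (e - s).toNat) := by
              have h2 : (e' - s).toNat = 2 * (e - s).toNat := by omega
              have h5 : (e - s).toNat * 2 ^ (f + 1) = 2 * ((e - s).toNat * 2 ^ f) := by
                rw [pow_succ]; ring
              rw [h2, mul_assoc]
              omega
            rw [harg, pv_forA_scan ((e - s).toNat) _ s e, hk, hfa]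

-- ===== VERDICT (by name: the statement is the Claim_ definition above) =====
theorem doubleton_spec : Claim_equal_doubleton := by
  intro n _
  unfold Spec_doubleton doubleton doubleton_alt
  have h := pv_whileA_eq 63 n (n + 1) (by omega)
  rw [show ((n + 1 - n).toNat * 2 ^ 63) = 9223372036854775808 by norm_num] at h
  exact h
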